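-- pv_equiv track=rewrite | github.com/Surajpedd/Coding-Problems-Solutions | Codechef/October Challenge 2020 Division 2/Replace for X.py | find
-- ===== SOURCE A (Python) =====
-- def find(L,n,x,p):
--     m=n
--     ret=0
--     for i in range(n):
--         if L[i] == x:
--             if abs(p-i)<m:
--                 m=abs(p-i)
--                 ret=i
--     return ret
-- ===== SOURCE B (Python) =====
-- def find(L, n, x, p):
--     # Search outward from p: radius d = 0, 1, ..., n-1, testing p-d before p+d.
--     for d in range(n):
--         i = p - d
--         if 0 <= i < n and L[i] == x:
--             return i
--         i = p + d
--         if 0 <= i < n and L[i] == x: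
--             return i
--     return 0
-- ===== Notes on version B (the rewrite author's own statement) =====
-- stated objective: alternative
-- what changed: Replaces the full left-to-right scan with its running (min-distance, argmin) state by an outward search from p that returns the first match at radius d (testing p-d before p+d), which reproduces the smaller-index tie-break and the distance-< n cutoff.
import Mathlib
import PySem

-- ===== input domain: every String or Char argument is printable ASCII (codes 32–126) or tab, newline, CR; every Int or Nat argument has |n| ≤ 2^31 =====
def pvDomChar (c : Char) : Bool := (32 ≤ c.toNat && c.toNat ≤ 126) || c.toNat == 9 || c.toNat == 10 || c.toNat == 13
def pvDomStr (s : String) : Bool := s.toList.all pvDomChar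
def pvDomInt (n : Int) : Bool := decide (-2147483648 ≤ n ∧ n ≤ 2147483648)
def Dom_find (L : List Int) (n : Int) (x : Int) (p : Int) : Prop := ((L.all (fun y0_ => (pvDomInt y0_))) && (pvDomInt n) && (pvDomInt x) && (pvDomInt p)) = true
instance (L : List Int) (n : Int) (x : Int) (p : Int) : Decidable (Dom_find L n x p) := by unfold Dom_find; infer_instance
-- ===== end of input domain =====

-- B replaces A's full scan with an outward search from p (p-d before p+d), same cost class.


-- ===== PORT A =====
-- one step of A's loop body on state (m, ret)
def findStep (L : List Int) (x : Int) (p : Int) (st : Int × Int) (i : Int) : Int × Int :=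
  if PySem.List.pyGetD L i 0 = x then
    if |p - i| < st.1 then (|p - i|, i) else st
  else st

def find (L : List Int) (n : Int) (x : Int) (p : Int) : Int :=
  ((PySem.List.pyRange 0 n 1).foldl (findStep L x p) (n, 0)).2

-- ===== PORT B =====
-- B's loop: radius d = 0,1,…,n-1 (fuel counts the remaining radii), probe p-d then p+d
def findAltLoop (L : List Int) (n : Int) (x : Int) (p : Int) : Nat → Int → Int
  | 0, _ => 0
  | fuel + 1, d =>
    if 0 ≤ p - d ∧ p - d < n ∧ PySem.List.pyGetD L (p - d) 0 = x then p - d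
    else if 0 ≤ p + d ∧ p + d < n ∧ PySem.List.pyGetD L (p + d) 0 = x then p + d
    else findAltLoop L n x p fuel (d + 1)

def find_alt (L : List Int) (n : Int) (x : Int) (p : Int) : Int :=
  findAltLoop L n x p n.toNat 0

-- ===== PRECONDITION & SPEC =====
-- Pre_ excludes exactly the inputs where Python's L[i] raises IndexError in A: n > len(L).
def Pre_find (L : List Int) (n : Int) (x : Int) (p : Int) : Prop := n ≤ (L.length : Int)
instance (L : List Int) (n : Int) (x : Int) (p : Int) : Decidable (Pre_find L n x p) := by
  unfold Pre_find; infer_instance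
def pvWitness_find : List Int × Int × Int × Int := ([1, 2, 1], 3, 1, 1)

def Spec_find (L : List Int) (n : Int) (x : Int) (p : Int) (out : Int) : Prop := out = find_alt L n x p
instance (L : List Int) (n : Int) (x : Int) (p : Int) (out : Int) : Decidable (Spec_find L n x p out) := by
  unfold Spec_find; infer_instance

-- ===== CLAIM =====
def Claim_equal_find : Prop := ∀ (L : List Int) (n : Int) (x : Int) (p : Int),
  Dom_find L n x p → Pre_find L n x p → Spec_find L n x p (find L n x p)

-- ===== LEMMAS AND PROOFS =====
-- i is a position A would record: in range [0,n) and holding x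
def pvGood (L : List Int) (n : Int) (x : Int) (i : Int) : Prop :=
  0 ≤ i ∧ i < n ∧ PySem.List.pyGetD L i 0 = x

-- invariant of A's fold after processing indices 0..m-1
def pvInv (L : List Int) (n : Int) (x : Int) (p : Int) (m : Int) (st : Int × Int) : Prop :=
  (st = (n, 0) ∧ ∀ j, pvGood L n x j → j < m → n ≤ |p - j|)
  ∨ (pvGood L n x st.2 ∧ st.2 < m ∧ st.1 = |p - st.2| ∧ st.1 < n ∧
      ∀ j, pvGood L n x j → j < m → st.1 < |p - j| ∨ (st.1 = |p - j| ∧ st.2 ≤ j))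

lemma fold_inv (L : List Int) (n x p : Int) (k : Nat) (hk : (k : Int) ≤ n) :
    pvInv L n x p k ((PySem.List.pyRange 0 k 1).foldl (findStep L x p) (n, 0)) := by
  induction k with
  | zero =>
    have h0 : PySem.List.pyRange 0 ((0:Nat):Int) 1 = [] :=
      PySem.List.pyRange_one_eq_nil (by norm_num)
    rw [h0]
    unfold pvInv
    exact Or.inl ⟨rfl, fun j hj hj0 => absurd hj0 (not_lt.mpr hj.1)⟩
  | succ k ih =>
    have hk' : (k : Int) ≤ n := by push_cast at hk ⊢; omega
    have hsplit : PySem.List.pyRange 0 ((k:Int)+1) 1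
        = PySem.List.pyRange 0 (k:Int) 1 ++ [(k:Int)] :=
      PySem.List.pyRange_one_succ_right (by omega)
    have hcast : ((k+1 : Nat) : Int) = (k : Int) + 1 := by push_cast; ring
    rw [hcast, hsplit, List.foldl_append]
    simp only [List.foldl_cons, List.foldl_nil]
    set st := (PySem.List.pyRange 0 (k:Int) 1).foldl (findStep L x p) (n, 0) with hst
    have hinv := ih hk'
    unfold pvInv at hinv ⊢
    unfold findStep
    by_cases hx : PySem.List.pyGetD L (k:Int) 0 = x
    · by_cases hlt : |p - (k:Int)| < st.1
      · rw [if_pos hx, if_pos hlt]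
        right
        refine ⟨⟨by omega, by push_cast at hk; omega, hx⟩, by omega, rfl, ?_, ?_⟩
        · -- |p-k| < st.1 ≤ n
          rcases hinv with ⟨h1, _⟩ | ⟨_, _, _, h4, _⟩
          · simp [h1] at hlt; omega
          · omega
        · intro j hj hjm
          rcases lt_or_eq_of_le (by omega : j ≤ (k:Int)) with hjk | hjk
          · left
            rcases hinv with ⟨h1, h2⟩ | ⟨_, _, _, _, h5⟩
            · have := h2 j hj hjk; simp [h1] at hlt; omega
            · rcases h5 j hj hjk with h | h <;> omega
          · right; subst hjk; exact ⟨rfl, le_refl _⟩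
      · rw [if_pos hx, if_neg hlt]
        rcases hinv with ⟨h1, h2⟩ | ⟨h1, h2, h3, h4, h5⟩
        · left
          refine ⟨h1, fun j hj hjm => ?_⟩
          rcases lt_or_eq_of_le (by omega : j ≤ (k:Int)) with hjk | hjk
          · exact h2 j hj hjk
          · subst hjk; simp [h1] at hlt; omega
        · right
          refine ⟨h1, by omega, h3, h4, fun j hj hjm => ?_⟩
          rcases lt_or_eq_of_le (by omega : j ≤ (k:Int)) with hjk | hjk
          · exact h5 j hj hjk
          · subst hjk
            rcases lt_or_eq_of_le (not_lt.mp hlt) with h | h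
            · left; exact h
            · right; exact ⟨h.symm ▸ rfl, by omega⟩
    · rw [if_neg hx]
      rcases hinv with ⟨h1, h2⟩ | ⟨h1, h2, h3, h4, h5⟩
      · left
        refine ⟨h1, fun j hj hjm => ?_⟩
        rcases lt_or_eq_of_le (by omega : j ≤ (k:Int)) with hjk | hjk
        · exact h2 j hj hjk
        · subst hjk; exact absurd hj.2.2 hx
      · right
        refine ⟨h1, by omega, h3, h4, fun j hj hjm => ?_⟩
        rcases lt_or_eq_of_le (by omega : j ≤ (k:Int)) with hjk | hjk
        · exact h5 j hj hjk
        · subst hjk; exact absurd hj.2.2 hx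

lemma alt_none (L : List Int) (n x p : Int)
    (hno : ∀ j, pvGood L n x j → n ≤ |p - j|) :
    ∀ (fuel : Nat) (d : Int), 0 ≤ d → (fuel : Int) + d ≤ n →
      findAltLoop L n x p fuel d = 0 := by
  intro fuel
  induction fuel with
  | zero => intro d _ _; rfl
  | succ fuel ih =>
    intro d hd hfd
    have hdn : d < n := by push_cast at hfd; omega
    unfold findAltLoop
    rw [if_neg, if_neg]
    · exact ih (d + 1) (by omega) (by push_cast at hfd ⊢; omega)
    · rintro ⟨h1, h2, h3⟩
      have := hno (p + d) ⟨h1, h2, h3⟩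
      rw [show p - (p + d) = -d by ring, abs_neg, abs_of_nonneg hd] at this
      omega
    · rintro ⟨h1, h2, h3⟩
      have := hno (p - d) ⟨h1, h2, h3⟩
      rw [show p - (p - d) = d by ring, abs_of_nonneg hd] at this
      omega

lemma alt_found (L : List Int) (n x p r : Int)
    (hr : pvGood L n x r)
    (hmin : ∀ j, pvGood L n x j → |p - r| < |p - j| ∨ (|p - r| = |p - j| ∧ r ≤ j)) :
    ∀ (fuel : Nat) (d : Int), 0 ≤ d → d ≤ |p - r| → |p - r| < (fuel : Int) + d →
      findAltLoop L n x p fuel d = r := by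
  intro fuel
  induction fuel with
  | zero => intro d hd hdr hfd; push_cast at hfd; omega
  | succ fuel ih =>
    intro d hd hdr hfd
    unfold findAltLoop
    rcases lt_or_eq_of_le hdr with hdlt | hdeq
    · -- d < |p - r| : both probes must fail
      rw [if_neg, if_neg]
      · exact ih (d + 1) (by omega) (by omega) (by push_cast at hfd ⊢; omega)
      · rintro ⟨h1, h2, h3⟩
        rcases hmin (p + d) ⟨h1, h2, h3⟩ with h | h <;>
          rw [show p - (p + d) = -d by ring, abs_neg, abs_of_nonneg hd] at h <;> omega
      · rintro ⟨h1, h2, h3⟩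
        rcases hmin (p - d) ⟨h1, h2, h3⟩ with h | h <;>
          rw [show p - (p - d) = d by ring, abs_of_nonneg hd] at h <;> omega
    · -- d = |p - r| : one of the two probes is r
      have hcases : r = p - d ∨ r = p + d := by
        rcases abs_cases (p - r) with ⟨h, _⟩ | ⟨h, _⟩ <;> omega
      by_cases hp1 : 0 ≤ p - d ∧ p - d < n ∧ PySem.List.pyGetD L (p - d) 0 = x
      · rw [if_pos hp1]
        rcases hmin (p - d) hp1 with h | ⟨_, hle⟩
        · rw [show p - (p - d) = d by ring, abs_of_nonneg hd] at h; omega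
        · rcases hcases with h | h
          · omega
          · -- r = p + d and r ≤ p - d force d = 0
            omega
      · rw [if_neg hp1]
        have hr2 : r = p + d := by
          rcases hcases with h | h
          · exact absurd (h ▸ hr) hp1
          · exact h
        have hcond : 0 ≤ p + d ∧ p + d < n ∧ PySem.List.pyGetD L (p + d) 0 = x :=
          hr2 ▸ hr
        rw [if_pos hcond]
        omega

-- ===== VERDICT =====
theorem find_spec : Claim_equal_find := by
  intro L n x p _ _
  unfold Spec_find find find_alt
  by_cases hn : 0 < n
  · have hcast : ((n.toNat : Nat) : Int) = n := Int.toNat_of_nonneg (by omega)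
    have hinv := fold_inv L n x p n.toNat (by omega)
    rw [hcast] at hinv
    rw [show PySem.List.pyRange 0 n 1 = PySem.List.pyRange 0 ((n.toNat : Nat) : Int) 1 by
      rw [hcast]]
    rw [hcast]
    rcases hinv with ⟨h1, h2⟩ | ⟨h1, h2, h3, h4, h5⟩
    · rw [h1]
      exact (alt_none L n x p
        (fun j hj => h2 j hj hj.2.1) n.toNat 0 (by omega) (by omega)).symm
    · exact (alt_found L n x p _ h1
        (fun j hj => by
          rcases h5 j hj hj.2.1 with h | h
          · left; omega
          · right; omega)
        n.toNat 0 (le_refl 0) (abs_nonneg _) (by omega)).symm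
  · rw [PySem.List.pyRange_one_eq_nil (by omega), show n.toNat = 0 by omega]
    rfl
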